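-- pv_equiv track=rewrite | github.com/mpryor/nothing-less | nless/regex_wizard.py | _inject_group_names
-- ===== SOURCE A (Python) =====
-- def _inject_group_names(pattern_str: str, names: list[str]) -> str:
--     """Replace each unnamed ``(`` with ``(?P<name>`` using names in order.
--
--     Skips escaped parens ``\\(``, character classes ``[(]``, and
--     ``(?...`` (non-capturing, lookahead, named groups).
--     """
--     result: list[str] = []
--     name_idx = 0
--     i = 0
--     n = len(pattern_str)
--     while i < n:
--         ch = pattern_str[i]
--         if ch == "\\" and i + 1 < n:
--             result.append(pattern_str[i : i + 2])
--             i += 2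
--             continue
--         if ch == "[":
--             # Copy entire character class
--             start = i
--             i += 1
--             while i < n and pattern_str[i] != "]":
--                 if pattern_str[i] == "\\" and i + 1 < n:
--                     i += 1
--                 i += 1
--             i += 1  # closing ]
--             result.append(pattern_str[start:i])
--             continue
--         if ch == "(":
--             if i + 1 < n and pattern_str[i + 1] == "?":
--                 # Non-capturing / named / lookahead — copy as-is
--                 result.append("(")
--                 i += 1
--                 continue
--             # Unnamed capturing group — inject name
--             if name_idx < len(names):
--                 result.append(f"(?P<{names[name_idx]}>")
--                 name_idx += 1
--             else:
--                 result.append("(")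
--             i += 1
--             continue
--         result.append(ch)
--         i += 1
--     return "".join(result)
-- ===== SOURCE B (Python) =====
-- def _inject_group_names(pattern_str: str, names: list[str]) -> str:
--     """Single-pass DFA over the characters: explicit modes replace the
--     index cursor, lookahead and inner character-class loop of the original."""
--     NORMAL, ESC, CLS, CLSESC, PAREN = range(5)
--     out: list[str] = []
--     idx = 0
--     mode = NORMAL
--
--     def inject(idx):
--         if idx < len(names):
--             out.append("(?P<" + names[idx] + ">")
--             return idx + 1
--         out.append("(")
--         return idx
--
--     def normal_step(idx, ch):
--         if ch == "\\":
--             return ESC, idx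
--         if ch == "[":
--             out.append(ch)
--             return CLS, idx
--         if ch == "(":
--             return PAREN, idx
--         out.append(ch)
--         return NORMAL, idx
--
--     for ch in pattern_str:
--         if mode == NORMAL:
--             mode, idx = normal_step(idx, ch)
--         elif mode == ESC:
--             out.append("\\" + ch)
--             mode = NORMAL
--         elif mode == CLS:
--             out.append(ch)
--             if ch == "]":
--                 mode = NORMAL
--             elif ch == "\\":
--                 mode = CLSESC
--         elif mode == CLSESC:
--             out.append(ch)
--             mode = CLS
--         else:  # PAREN: decide on the character after '('
--             if ch == "?":
--                 out.append("(?")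
--                 mode = NORMAL
--             else:
--                 idx = inject(idx)
--                 mode, idx = normal_step(idx, ch)
--
--     if mode == ESC:
--         out.append("\\")
--     elif mode == PAREN:
--         inject(idx)
--     return "".join(out)
-- ===== Notes on version B (the rewrite author's own statement) =====
-- stated objective: alternative
-- what changed: Replaced A's index-cursor scanner (with one-character lookahead and an inner while-loop for character classes) by a single left-to-right DFA fold over the characters with explicit modes (escape, class, class-escape, pending-paren) that accumulates the output string directly.
import Mathlib
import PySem

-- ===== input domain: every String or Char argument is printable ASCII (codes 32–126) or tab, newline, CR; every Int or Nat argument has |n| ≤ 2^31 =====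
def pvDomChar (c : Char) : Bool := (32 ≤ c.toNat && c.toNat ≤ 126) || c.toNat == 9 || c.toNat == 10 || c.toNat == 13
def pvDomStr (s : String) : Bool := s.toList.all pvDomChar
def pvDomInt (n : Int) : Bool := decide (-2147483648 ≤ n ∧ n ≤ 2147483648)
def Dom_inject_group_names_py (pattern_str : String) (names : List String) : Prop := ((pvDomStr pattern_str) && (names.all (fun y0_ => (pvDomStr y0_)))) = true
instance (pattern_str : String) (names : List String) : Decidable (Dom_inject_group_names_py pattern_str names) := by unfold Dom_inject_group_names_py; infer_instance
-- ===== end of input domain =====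

-- B replaces A's index cursor with lookahead and an inner character-class loop by a
-- single left-to-right DFA fold with explicit modes (escape / class / pending-paren);
-- objective: alternative (same O(n) cost, different algorithmic decomposition).

-- ===== PORT A =====
-- inner 'while' copying a character class: returns (chars copied incl. closing ']', rest)
def pvClassScan : List Char → List Char × List Char
  | [] => ([], [])
  | ']' :: rest => ([']'], rest)
  | '\\' :: c :: rest =>
      let p := pvClassScan rest
      ('\\' :: c :: p.1, p.2)
  | c :: rest =>
      let p := pvClassScan rest
      (c :: p.1, p.2)

theorem pvClassScan_snd_le (s : List Char) : (pvClassScan s).2.length ≤ s.length := by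
  induction s using pvClassScan.induct <;> simp_all [pvClassScan] <;> omega

-- A's main while-loop: result pieces in order; name_idx is the Nat argument
def pvGoA (names : List String) : List Char → Nat → List (List Char)
  | [], _ => []
  | '\\' :: c :: rest, idx => ['\\', c] :: pvGoA names rest idx
  | '[' :: rest, idx =>
      let p := pvClassScan rest
      ('[' :: p.1) :: pvGoA names p.2 idx
  | '(' :: '?' :: rest, idx => ['('] :: pvGoA names ('?' :: rest) idx
  | '(' :: rest, idx =>
      match names[idx]? with
      | some nm => ('(' :: '?' :: 'P' :: '<' :: (nm.toList ++ ['>'])) :: pvGoA names rest (idx + 1)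
      | none => ['('] :: pvGoA names rest idx
  | c :: rest, idx => [c] :: pvGoA names rest idx
  termination_by s _ => s.length
  decreasing_by all_goals first
    | (simp; done)
    | (simp; omega)
    | (simp; have := pvClassScan_snd_le rest; omega)

def inject_group_names_py (pattern_str : String) (names : List String) : String :=
  String.ofList (List.flatten (pvGoA names pattern_str.toList 0))

-- ===== PORT B =====
inductive PvBMode
  | normal | esc | cls | clsEsc | paren
deriving DecidableEq, Repr

def pvInject (names : List String) (out : List Char) (idx : Nat) : List Char × Nat :=
  match names[idx]? with
  | some nm => (out ++ ('(' :: '?' :: 'P' :: '<' :: (nm.toList ++ ['>'])), idx + 1)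
  | none => (out ++ ['('], idx)

def pvNormalStep (out : List Char) (idx : Nat) (ch : Char) : PvBMode × List Char × Nat :=
  if ch = '\\' then (.esc, out, idx)
  else if ch = '[' then (.cls, out ++ [ch], idx)
  else if ch = '(' then (.paren, out, idx)
  else (.normal, out ++ [ch], idx)

def pvStep (names : List String) (st : PvBMode × List Char × Nat) (ch : Char) :
    PvBMode × List Char × Nat :=
  match st with
  | (.normal, out, idx) => pvNormalStep out idx ch
  | (.esc, out, idx) => (.normal, out ++ ['\\', ch], idx)
  | (.cls, out, idx) =>
      if ch = ']' then (.normal, out ++ [ch], idx)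
      else if ch = '\\' then (.clsEsc, out ++ [ch], idx)
      else (.cls, out ++ [ch], idx)
  | (.clsEsc, out, idx) => (.cls, out ++ [ch], idx)
  | (.paren, out, idx) =>
      if ch = '?' then (.normal, out ++ ['(', '?'], idx)
      else
        let p := pvInject names out idx
        pvNormalStep p.1 p.2 ch

def pvFinalize (names : List String) (st : PvBMode × List Char × Nat) : List Char :=
  match st with
  | (.esc, out, _) => out ++ ['\\']
  | (.paren, out, idx) => (pvInject names out idx).1
  | (_, out, _) => out

def inject_group_names_py_alt (pattern_str : String) (names : List String) : String :=
  String.ofList (pvFinalize names (pattern_str.toList.foldl (pvStep names) (.normal, [], 0)))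

-- ===== PRECONDITION & SPEC =====
def Spec_inject_group_names_py (pattern_str : String) (names : List String) (out : String) : Prop := out = inject_group_names_py_alt pattern_str names
instance (pattern_str : String) (names : List String) (out : String) : Decidable (Spec_inject_group_names_py pattern_str names out) := by unfold Spec_inject_group_names_py; infer_instance

-- ===== CLAIM (what is proved, stated in full; the proofs are below) =====
def Claim_equal_inject_group_names_py : Prop := ∀ (pattern_str : String) (names : List String), Dom_inject_group_names_py pattern_str names → Spec_inject_group_names_py pattern_str names (inject_group_names_py pattern_str names)

-- ===== LEMMAS AND PROOFS =====

-- folding B from class mode over s = emitting A's class scan verbatim, then continuing in normal mode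
theorem pv_cls_lemma (names : List String) (s : List Char) :
    ∀ out idx,
      pvFinalize names (s.foldl (pvStep names) (.cls, out, idx)) =
        pvFinalize names ((pvClassScan s).2.foldl (pvStep names)
          (.normal, out ++ (pvClassScan s).1, idx)) := by
  induction s using pvClassScan.induct with
  | case1 => intro out idx; simp [pvClassScan, pvFinalize]
  | case2 rest => intro out idx; simp [pvClassScan, pvStep]
  | case3 c rest ih => intro out idx; simp [pvClassScan, pvStep, ih]
  | case4 c rest hne1 hne2 ih =>
      intro out idx
      by_cases hc : c = '\\'
      · subst hc
        cases rest with
        | nil => simp [pvClassScan, pvStep, pvFinalize]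
        | cons c1 rest1 => exact (hne2 c1 rest1 rfl rfl).elim
      · have h1 : c ≠ ']' := fun h => hne1 h
        simp [pvClassScan, pvStep, h1, hc, ih]

-- main invariant: folding B from normal mode computes A's remaining output
theorem pv_main_lemma (names : List String) :
    ∀ (s : List Char) (idx : Nat) (out : List Char),
      pvFinalize names (s.foldl (pvStep names) (.normal, out, idx)) =
        out ++ (pvGoA names s idx).flatten := by
  intro s idx
  induction s, idx using pvGoA.induct names with
  | case1 idx => intro out; simp [pvGoA, pvFinalize]
  | case2 c rest idx ih => intro out; simp [pvGoA, pvStep, pvNormalStep, ih]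
  | case3 rest idx p ih =>
      intro out
      have hp : p = pvClassScan rest := rfl
      rw [hp] at ih
      simp [pvGoA, pvStep, pvNormalStep, pv_cls_lemma, ih]
  | case4 rest idx ih =>
      intro out
      have h := ih (out ++ ['('])
      simp [pvStep, pvNormalStep] at h
      simp [pvGoA, pvStep, pvNormalStep, h]
  | case5 rest idx hne nm hnm ih =>
      intro out
      cases rest with
      | nil => simp [pvGoA, pvStep, pvFinalize, pvNormalStep, pvInject, hnm]
      | cons c rest1 =>
          have hcq : c ≠ '?' := fun hq => hne rest1 (by rw [hq])
          have h := ih ((pvInject names out idx).1)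
          simp [pvStep, pvNormalStep, pvInject, hnm] at h
          simp [pvGoA, pvStep, pvNormalStep, pvInject, hnm, hcq, h]
  | case6 rest idx hne hnm ih =>
      intro out
      cases rest with
      | nil => simp [pvGoA, pvStep, pvFinalize, pvNormalStep, pvInject, hnm]
      | cons c rest1 =>
          have hcq : c ≠ '?' := fun hq => hne rest1 (by rw [hq])
          have h := ih ((pvInject names out idx).1)
          simp [pvStep, pvNormalStep, pvInject, hnm] at h
          simp [pvGoA, pvStep, pvNormalStep, pvInject, hnm, hcq, h]
  | case7 c rest idx h1 h2 h3 h4 ih =>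
      intro out
      by_cases hc : c = '\\'
      · subst hc
        cases rest with
        | nil => simp [pvGoA, pvStep, pvNormalStep, pvFinalize]
        | cons c1 rest1 => exact (h1 c1 rest1 rfl rfl).elim
      · have hb : c ≠ '[' := fun h => h2 h
        have hp : c ≠ '(' := fun h => h4 h
        simp [pvGoA, pvStep, pvNormalStep, hc, hb, hp, ih]

-- ===== VERDICT (by name: the statement is the Claim_ definition above) =====
theorem inject_group_names_py_spec : Claim_equal_inject_group_names_py := by
  intro p names _
  unfold Spec_inject_group_names_py inject_group_names_py inject_group_names_py_alt
  rw [pv_main_lemma]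
  simp
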